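-- pv_equiv track=rewrite | github.com/feirik/Writeups | guessing_game_4/solve.py | make_list_sixth
-- ===== SOURCE A (Python) =====
-- def make_list_sixth(false_count_list):
--     zero_false_list = []
--     one_false_list = []
--     two_false_list = []
--     three_false_list = []
--
--     iter = 0
--     for i in false_count_list:
--         if i == 0:
--             zero_false_list.append(iter)
--         if i == 1:
--             one_false_list.append(iter)
--         if i == 2:
--             two_false_list.append(iter)
--         if i == 3:
--             three_false_list.append(iter)
--         iter += 1
--
--     remove_zero = zero_false_list[0:64]
--     remove_one = one_false_list[:320]
--     remove_two = two_false_list[:640]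
--     remove_three = three_false_list[:640]
--
--     test_list = remove_zero + remove_one + remove_two + remove_three
--
--     return test_list
-- ===== SOURCE B (Python) =====
-- def make_list_sixth(false_count_list):
--     e = list(enumerate(false_count_list))
--     return ([i for i, v in e if v == 0][:64]
--             + [i for i, v in e if v == 1][:320]
--             + [i for i, v in e if v == 2][:640]
--             + [i for i, v in e if v == 3][:640])
-- ===== Notes on version B (the rewrite author's own statement) =====
-- stated objective: idiomatic
-- what changed: Replaced the single loop maintaining four accumulator lists plus a manual counter with four independent filtered comprehensions over enumerate, each capped and concatenated.
import Mathlib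
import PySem

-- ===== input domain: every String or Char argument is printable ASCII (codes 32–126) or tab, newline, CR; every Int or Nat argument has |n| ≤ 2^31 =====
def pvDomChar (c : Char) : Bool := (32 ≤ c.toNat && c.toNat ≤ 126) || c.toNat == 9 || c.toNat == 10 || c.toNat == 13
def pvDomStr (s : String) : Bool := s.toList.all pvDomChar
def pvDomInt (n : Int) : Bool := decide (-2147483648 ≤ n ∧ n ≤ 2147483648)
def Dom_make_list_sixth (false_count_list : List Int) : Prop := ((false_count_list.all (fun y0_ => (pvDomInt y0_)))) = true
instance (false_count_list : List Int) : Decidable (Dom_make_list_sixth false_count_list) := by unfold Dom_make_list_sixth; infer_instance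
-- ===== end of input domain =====

-- B replaces A's single bucketing loop (four accumulators + manual counter) with four
-- independent capped filtered passes over enumerate, concatenated; objective: idiomatic.

-- ===== PORT A =====
-- state: (zero_false_list, one_false_list, two_false_list, three_false_list, iter)
def pvStepA (s : List Int × List Int × List Int × List Int × Int) (i : Int) :
    List Int × List Int × List Int × List Int × Int :=
  let z := if i = 0 then s.1 ++ [s.2.2.2.2] else s.1
  let o := if i = 1 then s.2.1 ++ [s.2.2.2.2] else s.2.1
  let t := if i = 2 then s.2.2.1 ++ [s.2.2.2.2] else s.2.2.1
  let th := if i = 3 then s.2.2.2.1 ++ [s.2.2.2.2] else s.2.2.2.1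
  (z, o, t, th, s.2.2.2.2 + 1)

def make_list_sixth (false_count_list : List Int) : List Int :=
  let s := false_count_list.foldl pvStepA ([], [], [], [], 0)
  let remove_zero := PySem.List.slice s.1 (some 0) (some 64)
  let remove_one := PySem.List.slice s.2.1 none (some 320)
  let remove_two := PySem.List.slice s.2.2.1 none (some 640)
  let remove_three := PySem.List.slice s.2.2.2.1 none (some 640)
  remove_zero ++ remove_one ++ remove_two ++ remove_three

-- ===== PORT B =====
def pvBucket (e : List (Int × Int)) (v : Int) (cap : Nat) : List Int :=
  (e.filterMap (fun p => if p.2 = v then some p.1 else none)).take cap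

def make_list_sixth_alt (false_count_list : List Int) : List Int :=
  let e := PySem.List.enumerate false_count_list 0
  pvBucket e 0 64 ++ pvBucket e 1 320 ++ pvBucket e 2 640 ++ pvBucket e 3 640

-- ===== PRECONDITION & SPEC =====
def Spec_make_list_sixth (false_count_list : List Int) (out : List Int) : Prop := out = make_list_sixth_alt false_count_list
instance (false_count_list : List Int) (out : List Int) : Decidable (Spec_make_list_sixth false_count_list out) := by unfold Spec_make_list_sixth; infer_instance

-- ===== CLAIM (what is proved, stated in full; the proofs are below) =====
def Claim_equal_make_list_sixth : Prop := ∀ (false_count_list : List Int), Dom_make_list_sixth false_count_list → Spec_make_list_sixth false_count_list (make_list_sixth false_count_list)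

-- ===== LEMMAS AND PROOFS =====
def pvF (l : List Int) (it v : Int) : List Int :=
  (PySem.List.enumerate l it).filterMap (fun p => if p.2 = v then some p.1 else none)

theorem pvFoldA (l : List Int) : ∀ (z o t th : List Int) (it : Int),
    l.foldl pvStepA (z, o, t, th, it) =
      (z ++ pvF l it 0, o ++ pvF l it 1, t ++ pvF l it 2, th ++ pvF l it 3, it + l.length) := by
  induction l with
  | nil => intro z o t th it; simp [pvF, PySem.List.enumerate_nil]
  | cons x xs ih =>
    intro z o t th it
    simp only [List.foldl_cons, pvStepA, ih]
    simp [pvF, PySem.List.enumerate_cons, List.filterMap_cons]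
    split_ifs <;> simp <;> ring_nf

theorem make_list_sixth_spec : Claim_equal_make_list_sixth := by
  intro l _
  show make_list_sixth l = make_list_sixth_alt l
  simp only [make_list_sixth, make_list_sixth_alt, pvFoldA, pvBucket, pvF, List.nil_append]
  have h : ∀ (xs : List Int), PySem.List.slice xs none (some 64) = xs.take 64 ∧
      PySem.List.slice xs none (some 320) = xs.take 320 ∧
      PySem.List.slice xs none (some 640) = xs.take 640 := by
    intro xs
    refine ⟨?_, ?_, ?_⟩ <;> · rw [PySem.List.slice_to xs (by norm_num)]; congr 1
  simp [PySem.List.slice_zero_start, (h _).1, (h _).2.1, (h _).2.2]
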